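-- pv_equiv track=rewrite | github.com/chekdata/memor-upload | packages/chek-app-cli/cli_anything/frontend_app/frontend_cli.py | command_name
-- ===== SOURCE A (Python) =====
-- def command_name(value: str) -> str:
--     text = re_sub_non_word(str(value or ""))
--     chars = []
--     for index, char in enumerate(text):
--         if char.isupper() and index > 0 and (text[index - 1].islower() or text[index - 1].isdigit()):
--             chars.append("-")
--         chars.append(char.lower())
--     return "-".join(part for part in "".join(chars).replace("_", "-").split("-") if part)
--
-- def re_sub_non_word(value: str) -> str:
--     return "".join(char if char.isalnum() or char in {"_", "-"} else "-" for char in value)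
-- ===== SOURCE B (Python) =====
-- def command_name(value: str) -> str:
--     # Single-pass state machine: build word tokens directly, no separator
--     # insertion / replace / split / filter post-passes.
--     words = []
--     buf = []
--     prev = ""
--     for char in str(value or ""):
--         if char.isalnum():
--             if char.isupper() and prev and (prev.islower() or prev.isdigit()):
--                 words.append("".join(buf))
--                 buf = []
--             buf.append(char.lower())
--         else:
--             if buf:
--                 words.append("".join(buf))
--                 buf = []
--         prev = char
--     if buf:
--         words.append("".join(buf))
--     return "-".join(words)
-- ===== Notes on version B (the rewrite author's own statement) =====
-- stated objective: alternative
-- what changed: A builds an intermediate string by inserting separator dashes, then post-processes it with an underscore-to-dash replace, a dash split, an empty-part filter and a join; B is a single-pass state machine over the original characters that keeps a current-word buffer and a word list and emits the words directly, with no intermediate separator string and no split/filter post-pass.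
import Mathlib
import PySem

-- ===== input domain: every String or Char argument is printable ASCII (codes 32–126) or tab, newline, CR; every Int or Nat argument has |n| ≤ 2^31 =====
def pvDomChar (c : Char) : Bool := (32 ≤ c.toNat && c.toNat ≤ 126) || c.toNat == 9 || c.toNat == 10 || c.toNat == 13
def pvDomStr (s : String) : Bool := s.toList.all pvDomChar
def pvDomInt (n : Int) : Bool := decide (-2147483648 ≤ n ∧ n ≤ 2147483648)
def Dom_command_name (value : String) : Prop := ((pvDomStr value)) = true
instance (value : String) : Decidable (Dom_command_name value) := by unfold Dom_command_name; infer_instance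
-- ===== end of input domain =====

-- B replaces A's insert-separators / replace / split / filter / join pipeline by a
-- single-pass state machine that builds the word list directly (objective: alternative decomposition).

-- ===== PORT A =====
-- re_sub_non_word: each char kept if alnum or '_'/'-', else replaced by '-'
def pvReSubNonWord (cs : List Char) : List Char :=
  cs.map (fun c => if PySem.Chars.isalnum c || c == '_' || c == '-' then c else '-')

def command_name (value : String) : String :=
  -- str(value or "") = value for a str argument (an empty value yields "" = value itself)
  let text := pvReSubNonWord value.toList
  let chars := (PySem.List.enumerate text).foldl (fun (acc : List Char) (p : Int × Char) =>
      let cond := PySem.Chars.isupper p.2 && decide (0 < p.1) &&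
        (match PySem.List.pyGet? text (p.1 - 1) with
         | some q => PySem.Chars.islower q || PySem.Chars.isdigit q
         | none => false)
      (if cond then acc ++ ['-'] else acc) ++ [PySem.Chars.lowerChar p.2]) []
  let replaced := PySem.Chars.replace chars ['_'] ['-']
  let parts := (PySem.Chars.splitOn replaced ['-']).filter (fun part => part ≠ [])
  String.mk (PySem.Chars.join ['-'] parts)

-- ===== PORT B =====
-- state: (finished words, current word buffer, previous original char)
def pvStepB (st : List (List Char) × List Char × Option Char) (c : Char) :
    List (List Char) × List Char × Option Char :=
  let words := st.1
  let buf := st.2.1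
  let prev := st.2.2
  if PySem.Chars.isalnum c then
    if PySem.Chars.isupper c &&
        (match prev with
         | some p => PySem.Chars.islower p || PySem.Chars.isdigit p
         | none => false) then
      (words ++ [buf], [PySem.Chars.lowerChar c], some c)
    else
      (words, buf ++ [PySem.Chars.lowerChar c], some c)
  else
    ((if buf = [] then words else words ++ [buf]), [], some c)

def command_name_alt (value : String) : String :=
  -- str(value or "") = value for a str argument
  let st := value.toList.foldl pvStepB ([], [], none)
  let words := if st.2.1 = [] then st.1 else st.1 ++ [st.2.1]
  String.mk (PySem.Chars.join ['-'] words)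

-- ===== PRECONDITION & SPEC =====
def Spec_command_name (value : String) (out : String) : Prop := out = command_name_alt value
instance (value : String) (out : String) : Decidable (Spec_command_name value out) := by unfold Spec_command_name; infer_instance

-- ===== CLAIM (what is proved, stated in full; the proofs are below) =====
def Claim_equal_command_name : Prop := ∀ (value : String), Dom_command_name value → Spec_command_name value (command_name value)

-- ===== LEMMAS AND PROOFS =====

-- re_sub_non_word as a per-char map
def pvM (c : Char) : Char :=
  if PySem.Chars.isalnum c || c == '_' || c == '-' then c else '-'

-- the char A ends up emitting for an original char c (after re_sub, lower, '_'→'-')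
def pvRChar (c : Char) : Char :=
  if PySem.Chars.isalnum c then PySem.Chars.lowerChar c else '-'

-- camelCase boundary on original chars
def pvBnd (p? : Option Char) (c : Char) : Bool :=
  PySem.Chars.isupper c &&
    (match p? with
     | some p => PySem.Chars.islower p || PySem.Chars.isdigit p
     | none => false)

-- the char stream A's loop + replace produces, structurally
def pvEmit (p? : Option Char) : List Char → List Char
  | [] => []
  | c :: cs => (if pvBnd p? c then ['-'] else []) ++ [pvRChar c] ++ pvEmit (some c) cs

-- the raw char stream of A's loop (over mapped text, before '_'→'-')
def pvEmitRaw (p? : Option Char) : List Char → List Char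
  | [] => []
  | c :: cs => (if pvBnd p? c then ['-'] else []) ++ [PySem.Chars.lowerChar c] ++ pvEmitRaw (some c) cs

def pvMapRepl (c : Char) : Char := if c = '_' then '-' else c

-- structural version of splitOn on the single-char separator '-'
def pvSplitD : List Char → List Char → List (List Char) → List (List Char)
  | [], cur, acc => (cur.reverse :: acc).reverse
  | c :: rest, cur, acc =>
    if c = '-' then pvSplitD rest [] (cur.reverse :: acc)
    else pvSplitD rest (c :: cur) acc

-- forward "nonempty pieces" machine (cur is the current piece, reversed)
def pvF : List Char → List Char → List (List Char)
  | [], cur => if cur = [] then [] else [cur.reverse]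
  | c :: rest, cur =>
    if c = '-' then (if cur = [] then [] else [cur.reverse]) ++ pvF rest []
    else pvF rest (c :: cur)

def pvFinalWords (st : List (List Char) × List Char × Option Char) : List (List Char) :=
  if st.2.1 = [] then st.1 else st.1 ++ [st.2.1]

-- ---- char facts ----
lemma pv_isupper_isalnum {c : Char} (h : PySem.Chars.isupper c = true) :
    PySem.Chars.isalnum c = true := by
  simp [PySem.Chars.isalnum, PySem.Chars.isalpha, h]

lemma pv_islower_isalnum {c : Char} (h : PySem.Chars.islower c = true) :
    PySem.Chars.isalnum c = true := by
  simp [PySem.Chars.isalnum, PySem.Chars.isalpha, h]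

lemma pv_isdigit_isalnum {c : Char} (h : PySem.Chars.isdigit c = true) :
    PySem.Chars.isalnum c = true := by
  simp [PySem.Chars.isalnum, h]

lemma pv_upper_toNat {c : Char} (h : PySem.Chars.isupper c = true) :
    65 ≤ c.toNat ∧ c.toNat ≤ 90 := by
  simp [PySem.Chars.isupper, Char.le_def] at h
  exact ⟨(UInt32.le_iff_toNat_le).1 h.1, (UInt32.le_iff_toNat_le).1 h.2⟩

lemma pv_lower_ne {c d : Char} (h : PySem.Chars.isalnum c = true)
    (hd : PySem.Chars.isalnum d = false)
    (hdn : d.toNat < 97 ∨ 122 < d.toNat) : PySem.Chars.lowerChar c ≠ d := by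
  unfold PySem.Chars.lowerChar
  split
  · rename_i hu
    obtain ⟨h1, h2⟩ := pv_upper_toNat hu
    intro heq
    have h3 := congrArg Char.toNat heq
    rw [Char.toNat_ofNat] at h3
    rw [if_pos (Or.inl (by omega) : (c.toNat + 32).isValidChar)] at h3
    omega
  · intro heq
    subst heq
    rw [h] at hd
    exact absurd hd (by simp)

lemma pv_lower_ne_underscore {c : Char} (h : PySem.Chars.isalnum c = true) :
    PySem.Chars.lowerChar c ≠ '_' := pv_lower_ne h (by decide) (by decide)

lemma pv_lower_ne_dash {c : Char} (h : PySem.Chars.isalnum c = true) :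
    PySem.Chars.lowerChar c ≠ '-' := pv_lower_ne h (by decide) (by decide)

-- ---- splitOn on ['-'] is pvSplitD ----
lemma pv_splitOn_go (fuel : Nat) :
    ∀ (l cur : List Char) (acc : List (List Char)), l.length < fuel →
      PySem.Chars.splitOn.go ['-'] fuel l cur acc = pvSplitD l cur acc := by
  induction fuel with
  | zero => intro l cur acc h; omega
  | succ n ih =>
    intro l cur acc h
    cases l with
    | nil => simp [PySem.Chars.splitOn.go, pvSplitD]
    | cons c rest =>
      simp only [PySem.Chars.splitOn.go, pvSplitD]
      by_cases hc : c = '-'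
      · subst hc
        rw [if_pos (by simp [List.isPrefixOf]), if_pos rfl]
        simpa using ih rest [] (cur.reverse :: acc) (by simpa using Nat.lt_of_succ_lt_succ h)
      · rw [if_neg (by simp [List.isPrefixOf]; exact fun he => hc he.symm), if_neg hc]
        exact ih rest (c :: cur) acc (by simpa using Nat.lt_of_succ_lt_succ h)

lemma pv_splitOn_eq (s : List Char) :
    PySem.Chars.splitOn s ['-'] = pvSplitD s [] [] := by
  unfold PySem.Chars.splitOn
  exact pv_splitOn_go (s.length + 1) s [] [] (by omega)

-- ---- replace of single chars is a map ----
lemma pv_replace_go (fuel : Nat) :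
    ∀ (l acc : List Char),
      PySem.Chars.replace.go ['_'] ['-'] fuel l acc = acc.reverse ++ (l.take fuel).map pvMapRepl ++ l.drop fuel := by
  induction fuel with
  | zero => intro l acc; simp [PySem.Chars.replace.go]
  | succ n ih =>
    intro l acc
    cases l with
    | nil => simp [PySem.Chars.replace.go]
    | cons c rest =>
      simp only [PySem.Chars.replace.go]
      by_cases hc : c = '_'
      · subst hc
        rw [if_pos (by simp [List.isPrefixOf])]
        simp [ih, pvMapRepl]
      · rw [if_neg (by simp [List.isPrefixOf]; exact fun he => hc he.symm)]
        simp [ih, pvMapRepl, hc]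

lemma pv_replace_eq (s : List Char) :
    PySem.Chars.replace s ['_'] ['-'] = s.map pvMapRepl := by
  unfold PySem.Chars.replace
  rw [if_neg (by simp)]
  simp [pv_replace_go]

-- ---- filter ∘ pvSplitD = pvF ----
lemma pv_filter_splitD (S : List Char) :
    ∀ (cur : List Char) (acc : List (List Char)),
      (pvSplitD S cur acc).filter (fun part => part ≠ []) =
        acc.reverse.filter (fun part => part ≠ []) ++ pvF S cur := by
  induction S with
  | nil =>
    intro cur acc
    simp [pvSplitD, pvF, List.filter_append]
    by_cases h : cur = []
    · subst h; simp
    · simp [List.filter, List.reverse_eq_nil_iff, h]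
  | cons c rest ih =>
    intro cur acc
    simp only [pvSplitD, pvF]
    by_cases hc : c = '-'
    · subst hc
      rw [if_pos rfl, if_pos rfl, ih]
      simp [List.filter_append]
      by_cases h : cur = []
      · subst h; simp
      · simp [List.filter, List.reverse_eq_nil_iff, h]
    · rw [if_neg hc, if_neg hc, ih]

-- ---- A's enumerate fold = pvEmitRaw ----
lemma pv_enum_fold (text : List Char) :
    ∀ (rest pre acc : List Char), text = pre ++ rest →
      (PySem.List.enumerate rest (pre.length : Int)).foldl (fun (acc : List Char) (p : Int × Char) =>
        let cond := PySem.Chars.isupper p.2 && decide (0 < p.1) &&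
          (match PySem.List.pyGet? text (p.1 - 1) with
           | some q => PySem.Chars.islower q || PySem.Chars.isdigit q
           | none => false)
        (if cond then acc ++ ['-'] else acc) ++ [PySem.Chars.lowerChar p.2]) acc =
      acc ++ pvEmitRaw pre.getLast? rest := by
  intro rest
  induction rest with
  | nil => intro pre acc h; simp [pvEmitRaw]
  | cons c cs ih =>
    intro pre acc h
    rw [PySem.List.enumerate_cons, List.foldl_cons]
    have hlen : ((pre.length : Int) + 1) = (((pre ++ [c]).length : Int)) := by
      simp only [List.length_append, List.length_cons, List.length_nil]
      push_cast
      omega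
    have htext : text = (pre ++ [c]) ++ cs := by simp [h]
    have hcond : (PySem.Chars.isupper c && decide (0 < (pre.length : Int)) &&
          (match PySem.List.pyGet? text ((pre.length : Int) - 1) with
           | some q => PySem.Chars.islower q || PySem.Chars.isdigit q
           | none => false)) = pvBnd pre.getLast? c := by
      cases hp : pre.getLast? with
      | none =>
        have : pre = [] := by simpa using hp
        subst this
        simp [pvBnd]
      | some p =>
        have hne : pre ≠ [] := by rintro rfl; simp at hp
        have hpos : 0 < pre.length := List.length_pos_iff.2 hne
        have hget : PySem.List.pyGet? text ((pre.length : Int) - 1) = some p := by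
          have h1 : ((pre.length : Int) - 1) = ((pre.length - 1 : Nat) : Int) := by
            push_cast [hpos]; omega
          rw [h1, PySem.List.pyGet?_natCast, h,
            List.getElem?_append_left (by omega), ← List.getLast?_eq_getElem?]
          exact hp
        simp [hget, pvBnd, hpos]
    rw [hcond]
    rw [hlen]
    rw [ih (pre ++ [c]) ((if pvBnd pre.getLast? c then acc ++ ['-'] else acc) ++ [PySem.Chars.lowerChar c]) htext]
    simp [pvEmitRaw]
    by_cases hb : pvBnd pre.getLast? c <;> simp [hb]

-- ---- the boundary test is unchanged by re_sub on either char ----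
lemma pv_bnd_map (p? : Option Char) (c : Char) : pvBnd (p?.map pvM) (pvM c) = pvBnd p? c := by
  have hupper : PySem.Chars.isupper (pvM c) = PySem.Chars.isupper c := by
    unfold pvM
    split
    · rfl
    · rename_i hn
      simp at hn
      have h1 : PySem.Chars.isupper c = false := by
        cases h : PySem.Chars.isupper c
        · rfl
        · exact absurd (pv_isupper_isalnum h) (by simp [hn.1])
      rw [h1]; decide
  cases p? with
  | none => simp [pvBnd, hupper]
  | some p =>
    have hprev : (PySem.Chars.islower (pvM p) || PySem.Chars.isdigit (pvM p)) =
        (PySem.Chars.islower p || PySem.Chars.isdigit p) := by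
      unfold pvM
      split
      · rfl
      · rename_i hn
        simp at hn
        have h1 : PySem.Chars.islower p = false := by
          cases h : PySem.Chars.islower p
          · rfl
          · exact absurd (pv_islower_isalnum h) (by simp [hn.1])
        have h2 : PySem.Chars.isdigit p = false := by
          cases h : PySem.Chars.isdigit p
          · rfl
          · exact absurd (pv_isdigit_isalnum h) (by simp [hn.1])
        rw [h1, h2]; decide
    simp [pvBnd, hupper, hprev]

lemma pv_repl_lower_m (c : Char) : pvMapRepl (PySem.Chars.lowerChar (pvM c)) = pvRChar c := by
  unfold pvM pvRChar
  by_cases h : PySem.Chars.isalnum c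
  · rw [if_pos (by simp [h]), if_pos h]
    exact if_neg (pv_lower_ne_underscore h)
  · rw [if_neg h]
    split
    · rename_i hm
      simp [h] at hm
      rcases hm with hm | hm <;> subst hm <;> decide
    · decide

-- ---- pushing re_sub + replace through the loop's stream gives pvEmit ----
lemma pv_emitRaw_map (cs : List Char) :
    ∀ (p? : Option Char),
      (pvEmitRaw (p?.map pvM) (cs.map pvM)).map pvMapRepl = pvEmit p? cs := by
  induction cs with
  | nil => intro p?; simp [pvEmitRaw, pvEmit]
  | cons c cs ih =>
    intro p?
    simp only [List.map_cons, pvEmitRaw, pvEmit, pv_bnd_map]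
    rw [List.map_append, List.map_append]
    rw [show (some (pvM c)) = (some c).map pvM from rfl, ih (some c)]
    by_cases hb : pvBnd p? c <;> simp [hb, pv_repl_lower_m, show pvMapRepl '-' = '-' by decide]

-- ---- pvF unfolding helpers ----
lemma pvF_cons_dash (S : List Char) (cur : List Char) :
    pvF ('-' :: S) cur = (if cur = [] then [] else [cur.reverse]) ++ pvF S [] := by
  simp [pvF]

lemma pvF_cons_ne {c : Char} (h : c ≠ '-') (S : List Char) (cur : List Char) :
    pvF (c :: S) cur = pvF S (c :: cur) := by
  simp [pvF, h]

-- ---- B's fold computes pvF of pvEmit ----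
lemma pv_main (cs : List Char) :
    ∀ (ws : List (List Char)) (buf : List Char) (p? : Option Char),
      (∀ p, p? = some p → (PySem.Chars.islower p || PySem.Chars.isdigit p) = true → buf ≠ []) →
      pvFinalWords (cs.foldl pvStepB (ws, buf, p?)) = ws ++ pvF (pvEmit p? cs) buf.reverse := by
  induction cs with
  | nil =>
    intro ws buf p? hinv
    simp only [List.foldl_nil, pvFinalWords, pvEmit, pvF]
    by_cases h : buf = []
    · subst h; simp
    · simp [h, List.reverse_eq_nil_iff]
  | cons c cs ih =>
    intro ws buf p? hinv
    rw [List.foldl_cons]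
    simp only [pvEmit, pvStepB]
    by_cases ha : PySem.Chars.isalnum c
    · have hr : pvRChar c = PySem.Chars.lowerChar c := if_pos ha
      rw [if_pos ha]
      by_cases hb : pvBnd p? c
      · have hb' := hb
        unfold pvBnd at hb'
        rw [if_pos hb']
        have hbuf : buf ≠ [] := by
          simp [pvBnd] at hb
          cases p? with
          | none => simp at hb
          | some p => exact hinv p rfl (by simpa using hb.2)
        rw [ih (ws ++ [buf]) [PySem.Chars.lowerChar c] (some c)
          (fun p hp _ => by simp)]
        rw [if_pos (by exact hb')]
        simp only [List.cons_append, List.nil_append]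
        rw [pvF_cons_dash, hr, pvF_cons_ne (pv_lower_ne_dash ha)]
        rw [if_neg (by simp [List.reverse_eq_nil_iff, hbuf])]
        simp
      · have hb' := hb
        unfold pvBnd at hb'
        rw [if_neg (by exact hb'), if_neg (by exact hb')]
        rw [ih ws (buf ++ [PySem.Chars.lowerChar c]) (some c)
          (fun p hp _ => by simp)]
        simp only [List.cons_append, List.nil_append]
        rw [hr, pvF_cons_ne (pv_lower_ne_dash ha)]
        simp
    · rw [if_neg ha]
      have hb : pvBnd p? c = false := by
        unfold pvBnd
        cases h : PySem.Chars.isupper c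
        · rfl
        · exact absurd (pv_isupper_isalnum h) ha
      have hr : pvRChar c = '-' := if_neg ha
      rw [ih (if buf = [] then ws else ws ++ [buf]) [] (some c)
        (fun p hp hlow => by
          have hal : PySem.Chars.isalnum p = true := by
            rcases Bool.or_eq_true_iff.1 hlow with h | h
            · exact pv_islower_isalnum h
            · exact pv_isdigit_isalnum h
          injection hp with hp2
          subst hp2
          exact absurd hal ha)]
      rw [hb, hr]
      rw [show (if false = true then ['-'] else []) = ([] : List Char) from rfl]
      simp only [List.cons_append, List.nil_append]
      rw [pvF_cons_dash]
      by_cases h : buf = []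
      · subst h; simp
      · simp [h, List.reverse_eq_nil_iff]

-- ---- assembling both sides ----
lemma pv_A_eq (value : String) :
    command_name value =
      String.mk (PySem.Chars.join ['-'] (pvF (pvEmit none value.toList) [])) := by
  unfold command_name
  try dsimp only
  rw [show pvReSubNonWord value.toList = value.toList.map pvM from rfl]
  have h0 := pv_enum_fold (value.toList.map pvM) (value.toList.map pvM) [] [] rfl
  simp only [List.length_nil, Nat.cast_zero, List.getLast?_nil, List.nil_append] at h0
  try dsimp only at h0
  rw [h0, pv_replace_eq]
  have h1 : (pvEmitRaw none (value.toList.map pvM)).map pvMapRepl = pvEmit none value.toList := by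
    simpa using pv_emitRaw_map value.toList none
  rw [h1, pv_splitOn_eq, pv_filter_splitD]
  simp

lemma pv_B_eq (value : String) :
    command_name_alt value =
      String.mk (PySem.Chars.join ['-'] (pvF (pvEmit none value.toList) [])) := by
  unfold command_name_alt
  try dsimp only
  have h := pv_main value.toList [] [] none (fun p hp => by simp at hp)
  simp only [List.nil_append, List.reverse_nil] at h
  rw [show (if (value.toList.foldl pvStepB ([], [], none)).2.1 = []
        then (value.toList.foldl pvStepB ([], [], none)).1
        else (value.toList.foldl pvStepB ([], [], none)).1 ++ [(value.toList.foldl pvStepB ([], [], none)).2.1]) =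
      pvFinalWords (value.toList.foldl pvStepB ([], [], none)) from rfl, h]

-- ===== VERDICT (by name: the statement is the Claim_ definition above) =====
theorem command_name_spec : Claim_equal_command_name := by
  intro value _
  unfold Spec_command_name
  rw [pv_A_eq, pv_B_eq]
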